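-- pv_equiv track=rewrite | github.com/ChanWooKim-NLP/PythonPractice | 기능 개발 - 프로그래머스.py | solution
-- ===== SOURCE A (Python) =====
-- import math
--
-- def solution(progresses, speeds):
--     answer = []
--     stack = []
--
--     day_program = {}
--
--     while progresses:
--         func, s = progresses.pop(0), speeds.pop(0)
--         left = 100 - func
--         day = math.ceil(left / s)
--
--         stack.append(day)
--
--     while stack:
--         program = stack.pop(0)
--         answer.append(program)
--         try:
--             max_day = max(program, stack[0])
--         except:
--             break
--
--         if stack[0] < max_day:
--             stack[0] = max_day
--
--     for v in answer:
--         if v in day_program: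
--             day_program[v] += 1
--
--         else: day_program[v] = 1
--
--     answer = list(day_program.values())
--
--     return answer
-- ===== SOURCE B (Python) =====
-- import math
--
-- def solution(progresses, speeds):
--     # Same in-place consumption of the arguments as A; then one forward grouping pass.
--     days = []
--     while progresses:
--         p = progresses.pop(0)
--         s = speeds.pop(0)
--         days.append(math.ceil((100 - p) / s))
--     if not days:
--         return []
--     answer = []
--     leader = days[0]
--     count = 1
--     for d in days[1:]:
--         if d <= leader:
--             count += 1
--         else:
--             answer.append(count)
--             leader = d
--             count = 1
--     answer.append(count)
--     return answer
-- ===== Notes on version B (the rewrite author's own statement) =====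
-- stated objective: simpler
-- what changed: A propagates a running max through the day list by repeatedly mutating the front of a stack and then counts group sizes with a dictionary pass; B does one forward pass keeping a leader day and a counter, emitting each group size directly (same in-place consumption of the arguments).
import Mathlib
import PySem

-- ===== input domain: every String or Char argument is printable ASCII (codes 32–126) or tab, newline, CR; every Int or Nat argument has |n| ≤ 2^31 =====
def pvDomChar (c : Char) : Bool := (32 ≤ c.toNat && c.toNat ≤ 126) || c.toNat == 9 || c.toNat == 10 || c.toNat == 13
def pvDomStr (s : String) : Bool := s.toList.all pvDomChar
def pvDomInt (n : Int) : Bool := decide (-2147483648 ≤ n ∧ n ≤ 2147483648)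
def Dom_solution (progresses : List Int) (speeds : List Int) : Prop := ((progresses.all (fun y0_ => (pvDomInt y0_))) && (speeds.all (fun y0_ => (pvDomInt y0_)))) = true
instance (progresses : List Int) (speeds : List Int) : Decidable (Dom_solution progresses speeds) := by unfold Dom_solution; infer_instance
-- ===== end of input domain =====

-- B replaces A's running-max propagation + dict counting by a single forward grouping pass (simpler);
-- both A and B empty `progresses` and pop the consumed prefix of `speeds` in place — the equivalence
-- proved here is about the return value.


-- ===== PORT A =====
-- math.ceil((100-p)/s): exact integer ceiling; on Dom (|100-p| ≤ 2^31+100 < 2^53) the Python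
-- float division rounds by less than the distance to the nearest integer boundary, so this is exact.
def pyCeilDiv (a : Int) (s : Int) : Int := -(PySem.Int.floordiv (-a) s)

-- first while loop: pop progresses/speeds from the front, append ceil((100-p)/s)
def buildStackA : List Int → List Int → List Int
  | [], _ => []
  | _ :: _, [] => []          -- speeds exhausted: Python raises IndexError (excluded by Pre_)
  | p :: ps, s :: ss => pyCeilDiv (100 - p) s :: buildStackA ps ss

-- second while loop: pop front into answer; max with new front, write back if larger; break on IndexError
def propagateA : List Int → List Int
  | [] => []
  | program :: rest =>
    match rest with
    | [] => [program]         -- stack[0] raises IndexError → break (after appending program)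
    | s0 :: rs =>
      let max_day := max program s0
      program :: propagateA (if s0 < max_day then max_day :: rs else s0 :: rs)
termination_by xs => xs.length
decreasing_by simp_all; split; simp; simp

-- for-loop body: day_program[v] += 1 / = 1
def countStepA (d : PySem.Dict Int Int) (v : Int) : PySem.Dict Int Int :=
  if d.contains v then d.insert v (d.getD v 0 + 1) else d.insert v 1

def solution (progresses : List Int) (speeds : List Int) : List Int :=
  let stack := buildStackA progresses speeds
  let answer := propagateA stack
  (answer.foldl countStepA PySem.Dict.empty).values

-- ===== PORT B =====
def buildDaysB : List Int → List Int → List Int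
  | [], _ => []
  | _ :: _, [] => []          -- unreachable under Pre_ (Python B would raise IndexError too)
  | p :: ps, s :: ss => pyCeilDiv (100 - p) s :: buildDaysB ps ss

-- the for-loop over days[1:] with accumulator `answer`, leader and count
def groupLoopB (answer : List Int) (leader count : Int) : List Int → List Int
  | [] => answer ++ [count]
  | d :: rest =>
    if d ≤ leader then groupLoopB answer leader (count + 1) rest
    else groupLoopB (answer ++ [count]) d 1 rest

def solution_alt (progresses : List Int) (speeds : List Int) : List Int :=
  match buildDaysB progresses speeds with
  | [] => []
  | d :: rest => groupLoopB [] d 1 rest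

-- ===== PRECONDITION & SPEC =====
-- Pre_ excludes exactly the inputs where Python A raises: a zero speed among the consumed prefix
-- (ZeroDivisionError) or fewer speeds than progresses (IndexError on speeds.pop(0)).
def Pre_solution (progresses : List Int) (speeds : List Int) : Prop :=
  progresses.length ≤ speeds.length ∧ ∀ s ∈ speeds.take progresses.length, s ≠ 0
instance (progresses : List Int) (speeds : List Int) : Decidable (Pre_solution progresses speeds) := by
  unfold Pre_solution; infer_instance

def pvWitness_solution : List Int × List Int := ([93, 30, 55], [1, 30, 5])

def Spec_solution (progresses : List Int) (speeds : List Int) (out : List Int) : Prop := out = solution_alt progresses speeds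
instance (progresses : List Int) (speeds : List Int) (out : List Int) : Decidable (Spec_solution progresses speeds out) := by unfold Spec_solution; infer_instance

-- ===== CLAIM (what is proved, stated in full; the proofs are below) =====
def Claim_equal_solution : Prop := ∀ (progresses : List Int) (speeds : List Int), Dom_solution progresses speeds → Pre_solution progresses speeds → Spec_solution progresses speeds (solution progresses speeds)

-- ===== LEMMAS AND PROOFS =====

theorem build_eq (ps ss : List Int) : buildStackA ps ss = buildDaysB ps ss := by
  induction ps generalizing ss with
  | nil => rfl
  | cons p ps ih => cases ss with
    | nil => rfl
    | cons s ss => simp [buildStackA, buildDaysB, ih]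

-- tail of the propagated (prefix-max) list, structural in rest
def ptail (a : Int) : List Int → List Int
  | [] => []
  | d :: rs => max a d :: ptail (max a d) rs

theorem propagateA_cons (a : Int) (rest : List Int) :
    propagateA (a :: rest) = a :: ptail a rest := by
  induction rest generalizing a with
  | nil => simp [propagateA, ptail]
  | cons d rs ih =>
    rw [propagateA, ptail]
    have h : (if d < max a d then max a d :: rs else d :: rs) = max a d :: rs := by
      split
      · rfl
      · simp_all [max_def]
        omega
    simp only [h, ih]

-- non-accumulator form of B's grouping loop
def grp (leader count : Int) : List Int → List Int
  | [] => [count]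
  | d :: rest => if d ≤ leader then grp leader (count + 1) rest else count :: grp d 1 rest

theorem groupLoopB_eq (answer : List Int) (a c : Int) (rest : List Int) :
    groupLoopB answer a c rest = answer ++ grp a c rest := by
  induction rest generalizing answer a c with
  | nil => rfl
  | cons d rs ih =>
    rw [groupLoopB, grp]
    split <;> simp [ih]

theorem find_last (qs : List (Int × Int)) (a c : Int)
    (h : ∀ p ∈ qs, p.1 ≠ a) :
    List.find? (fun p => p.1 == a) (qs ++ [(a, c)]) = some (a, c) := by
  induction qs with
  | nil => simp
  | cons q qs ih =>
    have hq : ¬ (q.1 == a) = true := by simpa using h q (by simp)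
    simp only [List.cons_append, List.find?_cons, hq]
    exact ih (fun p hp => h p (by simp [hp]))

theorem countStepA_items_app (prev : List (Int × Int)) (a c : Int)
    (h : ∀ p ∈ prev, p.1 < a) :
    countStepA (PySem.Dict.mk (prev ++ [(a, c)])) a
      = PySem.Dict.mk (prev ++ [(a, c + 1)]) := by
  have hne : ∀ p ∈ prev, p.1 ≠ a := fun p hp => by have := h p hp; omega
  have hc : (PySem.Dict.mk (prev ++ [(a, c)])).contains a = true := by
    simp [PySem.Dict.contains]
  have hg : (PySem.Dict.mk (prev ++ [(a, c)])).getD a 0 = c := by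
    simp [PySem.Dict.getD, PySem.Dict.get?, find_last prev a c hne]
  simp only [countStepA, hc, if_pos, hg, PySem.Dict.insert]
  congr 1
  simp only [List.map_append]
  congr 1
  · rw [List.map_congr_left (g := id), List.map_id]
    intro p hp
    have : ¬ (p.1 == a) = true := by simpa using hne p hp
    simp [this]
  · simp

theorem countStepA_items_fresh (prev : List (Int × Int)) (b : Int)
    (h : ∀ p ∈ prev, p.1 < b) :
    countStepA (PySem.Dict.mk prev) b = PySem.Dict.mk (prev ++ [(b, 1)]) := by
  have hc : (PySem.Dict.mk prev).contains b = false := by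
    simp only [PySem.Dict.contains, List.any_eq_false]
    intro p hp
    have := h p hp
    simp; omega
  simp [countStepA, hc, PySem.Dict.insert]

-- main invariant: folding A's counter over the propagated tail, starting from a dict whose
-- last entry is the current leader, yields the earlier counts followed by B's group counts
theorem main_inv (rest : List Int) (a c : Int) (prev : List (Int × Int))
    (h : ∀ p ∈ prev, p.1 < a) :
    ((ptail a rest).foldl countStepA (PySem.Dict.mk (prev ++ [(a, c)]))).values
      = prev.map Prod.snd ++ grp a c rest := by
  induction rest generalizing a c prev with
  | nil => simp [ptail, PySem.Dict.values, grp]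
  | cons d rs ih =>
    rw [ptail, grp]
    by_cases hd : d ≤ a
    · have hm : max a d = a := by omega
      rw [hm, List.foldl_cons, countStepA_items_app prev a c h, if_pos hd]
      exact ih a (c + 1) prev h
    · have had : a < d := by omega
      have hm : max a d = d := by omega
      rw [hm, List.foldl_cons, if_neg hd]
      have step : countStepA (PySem.Dict.mk (prev ++ [(a, c)])) d
          = PySem.Dict.mk ((prev ++ [(a, c)]) ++ [(d, 1)]) := by
        apply countStepA_items_fresh
        intro p hp
        rcases List.mem_append.mp hp with hp | hp
        · have := h p hp; omega
        · rw [List.mem_singleton] at hp; subst hp; simpa using had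
      rw [step]
      have := ih d 1 (prev ++ [(a, c)]) (by
        intro p hp
        rcases List.mem_append.mp hp with hp | hp
        · have := h p hp; omega
        · rw [List.mem_singleton] at hp; subst hp; simpa using had)
      simpa using this

-- ===== VERDICT (by name: the statement is the Claim_ definition above) =====
theorem solution_spec : Claim_equal_solution := by
  intro ps ss _ _
  unfold Spec_solution solution solution_alt
  rw [build_eq]
  cases hdays : buildDaysB ps ss with
  | nil => simp [propagateA, PySem.Dict.values, PySem.Dict.empty]
  | cons a rest =>
    show (List.foldl countStepA PySem.Dict.empty (propagateA (a :: rest))).values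
        = groupLoopB [] a 1 rest
    rw [propagateA_cons, List.foldl_cons, groupLoopB_eq]
    have h0 : countStepA PySem.Dict.empty a = PySem.Dict.mk ([] ++ [(a, 1)]) := by
      simpa [PySem.Dict.empty] using countStepA_items_fresh [] a (by simp)
    rw [h0]
    simpa using main_inv rest a 1 [] (by simp)
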